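-- pv_equiv track=rewrite | github.com/Gili-Levy/TAU-project2 | tests.py | has_repeat2
-- ===== SOURCE A (Python) =====
-- def has_repeat2(s, k):
-- 	for i in range(0, len(s)-k): # i is the beginning of the 1st string
-- 		for j in range (i+1, len(s)-k+1): # j is the beginning of the 2nd string
-- 			s1 = s[i]
-- 			s2 = s[j]
-- 			if (s1 == s2) & (k == 1):  # if letters are equal
-- 				return True
-- 			if  s1 == s2:  # if letters are equal
-- 				counter = 1
-- 				for n in range (1, k):  # go through the next k-1 letters and check them
-- 					s1 = s[i+n]
-- 					s2 = s[j+n]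
-- 					if s1 != s2:  # if strings are not equal, search for a differnt j
-- 						break
-- 					elif s1 == s2: # checks if each letter is equal
-- 						counter += 1
--
-- 					if counter == k: # found k notes that are equal
-- 						return True
-- 	return False
-- ===== SOURCE B (Python) =====
-- def has_repeat2(s, k):
-- 	seen = set()
-- 	for i in range(0, len(s) - k + 1):
-- 		sub = s[i:i+k]
-- 		if sub in seen:
-- 			return True
-- 		seen.add(sub)
-- 	return False
-- ===== Notes on version B (the rewrite author's own statement) =====
-- stated objective: faster
-- what changed: Replaced A's nested pairwise character-by-character scan over all start pairs with a single pass that hashes each length-k substring into a set and reports a repeat on the first re-occurrence.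
import Mathlib
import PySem

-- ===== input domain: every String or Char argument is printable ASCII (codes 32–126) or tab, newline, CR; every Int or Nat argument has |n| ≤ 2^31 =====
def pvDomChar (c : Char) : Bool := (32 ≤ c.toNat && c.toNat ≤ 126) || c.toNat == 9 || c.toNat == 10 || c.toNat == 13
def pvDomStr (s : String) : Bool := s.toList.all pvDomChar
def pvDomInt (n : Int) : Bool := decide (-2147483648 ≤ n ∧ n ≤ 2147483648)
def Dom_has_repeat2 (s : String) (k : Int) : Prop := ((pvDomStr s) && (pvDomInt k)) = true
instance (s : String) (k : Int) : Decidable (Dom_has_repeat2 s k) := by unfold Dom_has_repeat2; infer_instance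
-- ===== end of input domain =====

-- B replaces A's nested pairwise character scan with one pass over a seen-set of
-- length-k substrings (objective: faster — one mention of each substring instead of
-- comparing all start pairs).

-- ===== PORT A =====
-- inner 'for n in range(1, k)' loop carrying 'counter'; returns true = Python's 'return True',
-- false = 'break' or loop exhausted (caller then moves to the next j)
def hrInner (cs : List Char) (k i j : Int) : List Int → Int → Bool
  | [], _ => false
  | n :: rest, counter =>
    match PySem.List.pyGet? cs (i + n), PySem.List.pyGet? cs (j + n) with
    | some s1, some s2 =>
        if s1 ≠ s2 then false
        else
          let counter := counter + 1
          if counter == k then true else hrInner cs k i j rest counter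
    | _, _ => false  -- Python raises IndexError here; excluded by Pre_

-- 'for j in range(i+1, len(s)-k+1)' loop
def hrJ (cs : List Char) (k i : Int) : List Int → Bool
  | [] => false
  | j :: rest =>
    match PySem.List.pyGet? cs i, PySem.List.pyGet? cs j with
    | some s1, some s2 =>
        if (s1 == s2) && (k == 1) then true
        else if s1 == s2 then
          if hrInner cs k i j (PySem.List.pyRange 1 k 1) 1 then true
          else hrJ cs k i rest
        else hrJ cs k i rest
    | _, _ => false  -- Python raises IndexError here; excluded by Pre_

-- 'for i in range(0, len(s)-k)' loop
def hrOuter (cs : List Char) (k : Int) : List Int → Bool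
  | [] => false
  | i :: rest =>
    if hrJ cs k i (PySem.List.pyRange (i + 1) ((cs.length : Int) - k + 1) 1) then true
    else hrOuter cs k rest

def has_repeat2 (s : String) (k : Int) : Bool :=
  hrOuter s.toList k (PySem.List.pyRange 0 ((s.toList.length : Int) - k) 1)

-- ===== PORT B =====
-- 'for i in range(0, len(s)-k+1): sub = s[i:i+k]; if sub in seen: return True; seen.add(sub)'
def hrGo (cs : List Char) (k : Int) : List Int → PySem.Set (List Char) → Bool
  | [], _ => false
  | i :: rest, seen =>
    let sub := PySem.List.slice cs (some i) (some (i + k))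
    if PySem.Set.contains seen sub then true
    else hrGo cs k rest (PySem.Set.add seen sub)

def has_repeat2_alt (s : String) (k : Int) : Bool :=
  hrGo s.toList k (PySem.List.pyRange 0 ((s.toList.length : Int) - k + 1) 1) PySem.Set.empty

-- ===== PRECONDITION & SPEC =====
-- Pre_ is exactly where the Python A returns: for every other input (k < 0, or k = 0 with a
-- nonempty string) A raises IndexError when an index reaches past the end of s.
def Pre_has_repeat2 (s : String) (k : Int) : Prop := 1 ≤ k ∨ (k = 0 ∧ s = "")
instance (s : String) (k : Int) : Decidable (Pre_has_repeat2 s k) := by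
  unfold Pre_has_repeat2; infer_instance

def pvWitness_has_repeat2 : String × Int := ("abab", 2)

def Spec_has_repeat2 (s : String) (k : Int) (out : Bool) : Prop := out = has_repeat2_alt s k
instance (s : String) (k : Int) (out : Bool) : Decidable (Spec_has_repeat2 s k out) := by
  unfold Spec_has_repeat2; infer_instance

-- ===== CLAIM (what is proved, stated in full; the proofs are below) =====
def Claim_equal_has_repeat2 : Prop := ∀ (s : String) (k : Int), Dom_has_repeat2 s k →
  Pre_has_repeat2 s k → Spec_has_repeat2 s k (has_repeat2 s k)

-- ===== LEMMAS AND PROOFS =====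

-- the length-k substring of cs starting at i
def pvSub (cs : List Char) (k i : Int) : List Char :=
  PySem.List.slice cs (some i) (some (i + k))

theorem pvSub_eq_drop_take (cs : List Char) (k i : Int) (hi : 0 ≤ i) (hk : 0 ≤ k) :
    pvSub cs k i = (cs.drop i.toNat).take k.toNat := by
  unfold pvSub
  rw [PySem.List.slice_toNat cs hi (by omega : (0:Int) ≤ i + k)]
  congr 1
  omega

theorem pvSub_eq_iff (cs : List Char) (k i j : Int) (hk : 1 ≤ k) (hi : 0 ≤ i)
    (hj : 0 ≤ j) (hik : i + k ≤ (cs.length : Int)) (hjk : j + k ≤ (cs.length : Int)) :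
    pvSub cs k i = pvSub cs k j ↔
      ∀ o : Int, 0 ≤ o → o < k → PySem.List.pyGet? cs (i + o) = PySem.List.pyGet? cs (j + o) := by
  rw [pvSub_eq_drop_take cs k i hi (by omega), pvSub_eq_drop_take cs k j hj (by omega)]
  have hilen : i.toNat + k.toNat ≤ cs.length := by omega
  have hjlen : j.toNat + k.toNat ≤ cs.length := by omega
  have hlen1 : ((cs.drop i.toNat).take k.toNat).length = k.toNat := by
    simp [List.length_take, List.length_drop]; omega
  have hlen2 : ((cs.drop j.toNat).take k.toNat).length = k.toNat := by
    simp [List.length_take, List.length_drop]; omega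
  constructor
  · intro h o ho hok
    have h1 : i + o = ((i.toNat + o.toNat : Nat) : Int) := by omega
    have h2 : j + o = ((j.toNat + o.toNat : Nat) : Int) := by omega
    rw [h1, h2, PySem.List.pyGet?_natCast, PySem.List.pyGet?_natCast]
    have hoe : o.toNat < k.toNat := by omega
    have := congrArg (fun l => l[o.toNat]?) h
    simpa [List.getElem?_take, List.getElem?_drop, hoe] using this
  · intro h
    apply List.ext_getElem (by rw [hlen1, hlen2])
    intro t ht1 ht2
    have htk : t < k.toNat := by omega
    have := h (t : Int) (by positivity) (by omega)
    have h1 : i + (t : Int) = ((i.toNat + t : Nat) : Int) := by omega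
    have h2 : j + (t : Int) = ((j.toNat + t : Nat) : Int) := by omega
    rw [h1, h2, PySem.List.pyGet?_natCast, PySem.List.pyGet?_natCast] at this
    have g1 : (i.toNat + t) < cs.length := by omega
    have g2 : (j.toNat + t) < cs.length := by omega
    rw [List.getElem?_eq_getElem g1, List.getElem?_eq_getElem g2] at this
    simp only [List.getElem_take, List.getElem_drop]
    exact Option.some_injective _ this

theorem hrInner_iff (cs : List Char) (k i j : Int) (t : Int) (ht1 : 1 ≤ t) (htk : t < k)
    (hi : 0 ≤ i) (hj : 0 ≤ j) (hik : i + k ≤ (cs.length : Int)) (hjk : j + k ≤ (cs.length : Int)) :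
    hrInner cs k i j (PySem.List.pyRange t k 1) t = true ↔
      ∀ o : Int, t ≤ o → o < k → PySem.List.pyGet? cs (i + o) = PySem.List.pyGet? cs (j + o) := by
  obtain ⟨m, hm⟩ : ∃ m : Nat, k - t = (m : Int) := ⟨(k - t).toNat, by omega⟩
  induction m generalizing t with
  | zero => omega
  | succ m ih =>
    obtain ⟨s1, hs1⟩ : ∃ c, PySem.List.pyGet? cs (i + t) = some c := by
      have h : i + t = (((i + t).toNat : Nat) : Int) := by omega
      rw [h, PySem.List.pyGet?_natCast]
      exact ⟨_, List.getElem?_eq_getElem (by omega)⟩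
    obtain ⟨s2, hs2⟩ : ∃ c, PySem.List.pyGet? cs (j + t) = some c := by
      have h : j + t = (((j + t).toNat : Nat) : Int) := by omega
      rw [h, PySem.List.pyGet?_natCast]
      exact ⟨_, List.getElem?_eq_getElem (by omega)⟩
    rw [PySem.List.pyRange_one_cons htk]
    by_cases hc : s1 = s2
    · subst hc
      by_cases hk1 : t + 1 = k
      · simp only [hrInner, hs1, hs2, ne_eq, not_true_eq_false, if_false,
          hk1, beq_self_eq_true, if_true, true_iff]
        intro o hto hok
        have : o = t := by omega
        subst this; rw [hs1, hs2]
      · have hrec := ih (t + 1) (by omega) (by omega) (by omega)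
        simp only [hrInner, hs1, hs2, ne_eq, not_true_eq_false, if_false,
          show (t + 1 == k) = false by simp [hk1], Bool.false_eq_true, if_false]
        rw [hrec]
        constructor
        · intro h o hto hok
          rcases eq_or_lt_of_le hto with heq | hlt
          · subst heq; rw [hs1, hs2]
          · exact h o (by omega) hok
        · intro h o hto hok
          exact h o (by omega) hok
    · simp only [hrInner, hs1, hs2, ne_eq, hc, not_false_eq_true, if_true,
        Bool.false_eq_true, false_iff]
      intro h
      have := h t le_rfl htk
      rw [hs1, hs2] at this
      exact hc (Option.some_injective _ this)

-- per-pair check performed by the body of A's j-loop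
theorem pair_check_iff (cs : List Char) (k i j : Int) (hk : 1 ≤ k) (hi : 0 ≤ i) (hij : i < j)
    (hjk : j + k ≤ (cs.length : Int)) (s1 s2 : Char)
    (h1 : PySem.List.pyGet? cs i = some s1) (h2 : PySem.List.pyGet? cs j = some s2) :
    (if (s1 == s2) && (k == 1) then true
     else if s1 == s2 then hrInner cs k i j (PySem.List.pyRange 1 k 1) 1 else false) = true ↔
      pvSub cs k i = pvSub cs k j := by
  have hik : i + k ≤ (cs.length : Int) := by omega
  rw [pvSub_eq_iff cs k i j hk hi (by omega) hik hjk]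
  by_cases hc : s1 = s2
  · subst hc
    by_cases hk1 : k = 1
    · subst hk1
      simp only [beq_self_eq_true, Bool.and_self, if_true, true_iff]
      intro o ho hok
      have : o = 0 := by omega
      subst this
      rw [add_zero, add_zero, h1, h2]
    · simp only [beq_self_eq_true, Bool.true_and,
        show (k == 1) = false by simp [hk1], Bool.false_eq_true, if_false, if_true]
      rw [hrInner_iff cs k i j 1 le_rfl (by omega) hi (by omega) hik hjk]
      constructor
      · intro h o ho hok
        rcases eq_or_lt_of_le ho with heq | hlt
        · subst heq; rw [add_zero, add_zero, h1, h2]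
        · exact h o (by omega) hok
      · intro h o ho hok
        exact h o (by omega) hok
  · simp only [show (s1 == s2) = false by simp [hc], Bool.false_and, Bool.false_eq_true,
      if_false, false_iff]
    intro h
    have := h 0 le_rfl (by omega)
    rw [add_zero, add_zero, h1, h2] at this
    exact hc (Option.some_injective _ this)

theorem hrJ_iff (cs : List Char) (k i : Int) (js : List Int) (hk : 1 ≤ k) (hi : 0 ≤ i)
    (hjs : ∀ j ∈ js, i < j ∧ j + k ≤ (cs.length : Int))
    (_hik : i + k ≤ (cs.length : Int)) :
    hrJ cs k i js = true ↔ ∃ j ∈ js, pvSub cs k i = pvSub cs k j := by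
  induction js with
  | nil => simp [hrJ]
  | cons j rest ih =>
    obtain ⟨hij, hjk⟩ := hjs j (List.mem_cons_self)
    obtain ⟨s1, h1⟩ : ∃ c, PySem.List.pyGet? cs i = some c := by
      have h : i = ((i.toNat : Nat) : Int) := by omega
      rw [h, PySem.List.pyGet?_natCast]
      exact ⟨_, List.getElem?_eq_getElem (by omega)⟩
    obtain ⟨s2, h2⟩ : ∃ c, PySem.List.pyGet? cs j = some c := by
      have h : j = ((j.toNat : Nat) : Int) := by omega
      rw [h, PySem.List.pyGet?_natCast]
      exact ⟨_, List.getElem?_eq_getElem (by omega)⟩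
    have hpair := pair_check_iff cs k i j hk hi hij hjk s1 s2 h1 h2
    have hrest := ih (fun x hx => hjs x (List.mem_cons_of_mem _ hx))
    simp only [hrJ, h1, h2]
    by_cases hgood : pvSub cs k i = pvSub cs k j
    · have hx := hpair.mpr hgood
      by_cases hA : (s1 == s2 && k == 1) = true
      · rw [if_pos hA]
        simp only [true_iff]
        exact ⟨j, List.mem_cons_self, hgood⟩
      · rw [if_neg hA] at hx ⊢
        by_cases hB : (s1 == s2) = true
        · rw [if_pos hB] at hx ⊢
          rw [if_pos hx]
          simp only [true_iff]
          exact ⟨j, List.mem_cons_self, hgood⟩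
        · rw [if_neg hB] at hx
          exact absurd hx (by simp)
    · have hAfalse : ((s1 == s2) && (k == 1)) ≠ true := by
        intro hA
        exact hgood (hpair.mp (by simp [hA]))
      rw [if_neg hAfalse]
      by_cases hB : s1 == s2
      · have hInner : hrInner cs k i j (PySem.List.pyRange 1 k 1) 1 ≠ true := by
          intro hI
          exact hgood (hpair.mp (by simp_all))
        simp only [hB, if_true, hInner, Bool.false_eq_true, if_false]
        rw [hrest]
        constructor
        · rintro ⟨x, hx, hgx⟩; exact ⟨x, List.mem_cons_of_mem _ hx, hgx⟩
        · rintro ⟨x, hx, hgx⟩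
          rcases List.mem_cons.mp hx with rfl | hx'
          · exact absurd hgx hgood
          · exact ⟨x, hx', hgx⟩
      · simp only [Bool.not_eq_true] at hB
        simp only [hB, Bool.false_eq_true, if_false]
        rw [hrest]
        constructor
        · rintro ⟨x, hx, hgx⟩; exact ⟨x, List.mem_cons_of_mem _ hx, hgx⟩
        · rintro ⟨x, hx, hgx⟩
          rcases List.mem_cons.mp hx with rfl | hx'
          · exact absurd hgx hgood
          · exact ⟨x, hx', hgx⟩

theorem hrOuter_iff (cs : List Char) (k : Int) (is : List Int) (hk : 1 ≤ k)
    (his : ∀ i ∈ is, 0 ≤ i ∧ i + k ≤ (cs.length : Int)) :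
    hrOuter cs k is = true ↔
      ∃ i ∈ is, ∃ j : Int, i < j ∧ j + k ≤ (cs.length : Int) ∧ pvSub cs k i = pvSub cs k j := by
  induction is with
  | nil => simp [hrOuter]
  | cons i rest ih =>
    obtain ⟨hi0, hik⟩ := his i (List.mem_cons_self)
    have hJ := hrJ_iff cs k i (PySem.List.pyRange (i + 1) ((cs.length : Int) - k + 1) 1) hk hi0
      (fun j hj => by
        have := PySem.List.mem_pyRange_one.mp hj
        exact ⟨by omega, by omega⟩) hik
    have hrest := ih (fun x hx => his x (List.mem_cons_of_mem _ hx))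
    simp only [hrOuter]
    split_ifs with hA
    · simp only [true_iff]
      obtain ⟨j, hj, hgx⟩ := hJ.mp hA
      have := PySem.List.mem_pyRange_one.mp hj
      exact ⟨i, List.mem_cons_self, j, by omega, by omega, hgx⟩
    · rw [hrest]
      constructor
      · rintro ⟨x, hx, j, h1, h2, h3⟩
        exact ⟨x, List.mem_cons_of_mem _ hx, j, h1, h2, h3⟩
      · rintro ⟨x, hx, j, h1, h2, h3⟩
        rcases List.mem_cons.mp hx with rfl | hx'
        · exact absurd (hJ.mpr ⟨j, PySem.List.mem_pyRange_one.mpr ⟨by omega, by omega⟩, h3⟩) hA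
        · exact ⟨x, hx', j, h1, h2, h3⟩

theorem hrGo_iff (cs : List Char) (k : Int) (js : List Int) (seen : PySem.Set (List Char)) :
    hrGo cs k js seen = true ↔
      ∃ l x r, js = l ++ x :: r ∧ (pvSub cs k x ∈ seen ∨ pvSub cs k x ∈ l.map (pvSub cs k)) := by
  induction js generalizing seen with
  | nil =>
    simp only [hrGo, Bool.false_eq_true, false_iff]
    rintro ⟨l, x, r, hsplit, -⟩
    exact absurd hsplit.symm (List.append_ne_nil_of_right_ne_nil l (by simp))
  | cons i rest ih =>
    simp only [hrGo, show PySem.List.slice cs (some i) (some (i + k)) = pvSub cs k i from rfl]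
    split_ifs with hc
    · simp only [true_iff]
      exact ⟨[], i, rest, rfl, Or.inl ((PySem.Set.contains_iff seen _).mp hc)⟩
    · rw [ih (seen.add (pvSub cs k i))]
      constructor
      · rintro ⟨l, x, r, hsplit, hmem⟩
        refine ⟨i :: l, x, r, by rw [hsplit]; rfl, ?_⟩
        rcases hmem with hseen | hl
        · rcases (PySem.Set.mem_add seen (pvSub cs k i) (pvSub cs k x)).mp hseen with h | h
          · exact Or.inl h
          · exact Or.inr (by simp [h])
        · exact Or.inr (by simp only [List.map_cons]; exact List.mem_cons_of_mem _ hl)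
      · rintro ⟨l, x, r, hsplit, hmem⟩
        cases l with
        | nil =>
          obtain ⟨rfl, rfl⟩ : i = x ∧ rest = r := by
            simpa using hsplit
          rcases hmem with hseen | hl
          · exact absurd ((PySem.Set.contains_iff seen _).mpr hseen) hc
          · simp at hl
        | cons a l' =>
          obtain ⟨rfl, hrest⟩ : i = a ∧ rest = l' ++ x :: r := by
            simpa using hsplit
          refine ⟨l', x, r, hrest, ?_⟩
          rcases hmem with hseen | hl
          · exact Or.inl ((PySem.Set.mem_add _ _ _).mpr (Or.inl hseen))
          · simp only [List.map_cons, List.mem_cons] at hl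
            rcases hl with heq | hl'
            · exact Or.inl ((PySem.Set.mem_add _ _ _).mpr (Or.inr heq))
            · exact Or.inr hl'

theorem a_iff (s : String) (k : Int) (hk : 1 ≤ k) :
    has_repeat2 s k = true ↔
      ∃ i j : Int, 0 ≤ i ∧ i < j ∧ j + k ≤ (s.toList.length : Int) ∧
        pvSub s.toList k i = pvSub s.toList k j := by
  unfold has_repeat2
  rw [hrOuter_iff s.toList k _ hk (fun i hi => by
    have := PySem.List.mem_pyRange_one.mp hi
    exact ⟨by omega, by omega⟩)]
  constructor
  · rintro ⟨i, hi, j, h1, h2, h3⟩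
    have := PySem.List.mem_pyRange_one.mp hi
    exact ⟨i, j, by omega, h1, h2, h3⟩
  · rintro ⟨i, j, h0, h1, h2, h3⟩
    exact ⟨i, PySem.List.mem_pyRange_one.mpr ⟨by omega, by omega⟩, j, h1, h2, h3⟩

theorem b_iff (s : String) (k : Int) (_hk : 1 ≤ k) :
    has_repeat2_alt s k = true ↔
      ∃ i j : Int, 0 ≤ i ∧ i < j ∧ j + k ≤ (s.toList.length : Int) ∧
        pvSub s.toList k i = pvSub s.toList k j := by
  unfold has_repeat2_alt
  rw [hrGo_iff]
  constructor
  · rintro ⟨l, x, r, hsplit, hmem⟩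
    rcases hmem with hseen | hl
    · exact absurd hseen (by simp [PySem.Set.empty])
    · obtain ⟨y, hy, hyx⟩ := List.mem_map.mp hl
      have hylt : y < x := by
        have hpw := PySem.List.pairwise_lt_pyRange_one 0 ((s.toList.length : Int) - k + 1)
        rw [hsplit] at hpw
        exact (List.pairwise_append.mp hpw).2.2 y hy x List.mem_cons_self
      have hxm : x ∈ PySem.List.pyRange 0 ((s.toList.length : Int) - k + 1) 1 := by
        rw [hsplit]; exact List.mem_append_right _ List.mem_cons_self
      have hym : y ∈ PySem.List.pyRange 0 ((s.toList.length : Int) - k + 1) 1 := by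
        rw [hsplit]; exact List.mem_append_left _ hy
      have hxb := PySem.List.mem_pyRange_one.mp hxm
      have hyb := PySem.List.mem_pyRange_one.mp hym
      exact ⟨y, x, by omega, hylt, by omega, hyx⟩
  · rintro ⟨i, j, h0, h1, h2, h3⟩
    refine ⟨PySem.List.pyRange 0 j 1, j, PySem.List.pyRange (j + 1) ((s.toList.length : Int) - k + 1) 1, ?_, ?_⟩
    · rw [PySem.List.pyRange_one_append 0 j ((s.toList.length : Int) - k + 1) (by omega) (by omega),
        PySem.List.pyRange_one_cons (by omega : j < (s.toList.length : Int) - k + 1)]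
    · exact Or.inr (List.mem_map.mpr ⟨i, PySem.List.mem_pyRange_one.mpr ⟨h0, h1⟩, h3⟩)

-- ===== VERDICT (by name: the statement is the Claim_ definition above) =====
theorem has_repeat2_spec : Claim_equal_has_repeat2 := by
  intro s k _ hpre
  unfold Spec_has_repeat2
  rcases hpre with hk | ⟨hk0, hs⟩
  · have := (a_iff s k hk).trans (b_iff s k hk).symm
    exact Bool.coe_iff_coe.mp this
  · subst hk0 hs; rfl
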